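-- pv_equiv track=rewrite | github.com/lukegwilkins/Shannon-Capacity-Graphs-Project | subgraphMatrixCalculator.py | convertClique
-- ===== SOURCE A (Python) =====
-- def convertClique(clique, n):
-- 	convertedClique=[]
-- 	for i in clique:
-- 		vertexData=i.split(",")
-- 		power=0
-- 		vertex=0
-- 		for i in vertexData:
-- 			vertex=vertex+int(i)*(n**power)
-- 			power+=1
-- 		convertedClique.append(vertex)
-- 	return convertedClique
-- ===== SOURCE B (Python) =====
-- def convertClique(clique, n):
--     result = []
--     for s in clique:
--         vertex = 0
--         for token in reversed(s.split(",")):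
--             vertex = vertex * n + int(token)
--         result.append(vertex)
--     return result
-- ===== Notes on version B (the rewrite author's own statement) =====
-- stated objective: idiomatic
-- what changed: Replaces the power-counter accumulation (vertex += int(t)*n**power) with Horner's method over the tokens in reversed order (vertex = vertex*n + int(t)), dropping the power variable and exponentiation entirely.
import Mathlib
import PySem

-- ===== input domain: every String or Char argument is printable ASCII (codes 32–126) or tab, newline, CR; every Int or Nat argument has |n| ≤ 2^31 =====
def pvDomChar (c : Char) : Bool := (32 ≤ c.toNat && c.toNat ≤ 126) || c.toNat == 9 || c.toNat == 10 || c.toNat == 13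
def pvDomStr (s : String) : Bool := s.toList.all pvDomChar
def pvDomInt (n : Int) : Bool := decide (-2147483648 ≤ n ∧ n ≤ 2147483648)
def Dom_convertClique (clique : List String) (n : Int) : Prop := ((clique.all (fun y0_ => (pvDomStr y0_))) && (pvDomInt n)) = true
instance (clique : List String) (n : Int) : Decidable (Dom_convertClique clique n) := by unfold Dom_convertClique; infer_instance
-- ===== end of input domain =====

-- B replaces A's power-counter accumulation (int(t)*n**power) with Horner's method over the
-- reversed token list (vertex = vertex*n + int(t)); same return value, no exponentiation.

-- ===== PORT A =====
-- int(i) raises ValueError on unparsable tokens; Pre_ excludes those inputs, so getD 0 is never hit inside Pre_.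
def convertClique (clique : List String) (n : Int) : List Int :=
  clique.foldl (fun convertedClique i =>
    let vertexData := (PySem.Str.split? i ",").getD []
    let pv := vertexData.foldl (fun (st : Nat × Int) t =>
        (st.1 + 1, st.2 + ((PySem.Int.ofStr? t).getD 0) * n ^ st.1)) ((0 : Nat), (0 : Int))
    convertedClique ++ [pv.2]) []

-- ===== PORT B =====
def convertClique_alt (clique : List String) (n : Int) : List Int :=
  clique.foldl (fun result s =>
    result ++ [((PySem.Str.split? s ",").getD []).reverse.foldl
      (fun vertex t => vertex * n + (PySem.Int.ofStr? t).getD 0) 0]) []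

-- ===== PRECONDITION & SPEC =====
-- Pre_ excludes exactly the inputs where Python's int() raises ValueError on some comma-separated token.
def Pre_convertClique (clique : List String) (n : Int) : Prop :=
  ∀ s ∈ clique, ∀ t ∈ (PySem.Str.split? s ",").getD [], (PySem.Int.ofStr? t).isSome
instance (clique : List String) (n : Int) : Decidable (Pre_convertClique clique n) := by
  unfold Pre_convertClique; infer_instance
def pvWitness_convertClique : List String × Int := (["1,2,3", "0", " -4 ,5"], 7)

def Spec_convertClique (clique : List String) (n : Int) (out : List Int) : Prop := out = convertClique_alt clique n
instance (clique : List String) (n : Int) (out : List Int) : Decidable (Spec_convertClique clique n out) := by unfold Spec_convertClique; infer_instance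

-- ===== CLAIM (what is proved, stated in full; the proofs are below) =====
def Claim_equal_convertClique : Prop := ∀ (clique : List String) (n : Int), Dom_convertClique clique n → Pre_convertClique clique n → Spec_convertClique clique n (convertClique clique n)

-- ===== LEMMAS AND PROOFS =====

-- value of a token list read least-significant-first in base n
def pvHorner (n : Int) (ts : List String) : Int :=
  ts.foldr (fun t acc => (PySem.Int.ofStr? t).getD 0 + n * acc) 0

theorem pvInnerA (n : Int) (ts : List String) : ∀ (p : Nat) (v : Int),
    (ts.foldl (fun (st : Nat × Int) t =>
        (st.1 + 1, st.2 + ((PySem.Int.ofStr? t).getD 0) * n ^ st.1)) (p, v)).2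
      = v + n ^ p * pvHorner n ts := by
  induction ts with
  | nil => intro p v; simp [pvHorner]
  | cons t ts ih =>
      intro p v
      simp only [List.foldl_cons, pvHorner, List.foldr_cons]
      rw [ih]
      have : pvHorner n ts = ts.foldr (fun t acc => (PySem.Int.ofStr? t).getD 0 + n * acc) 0 := rfl
      rw [← this, pow_succ]
      ring

theorem pvInnerB (n : Int) (ts : List String) : ∀ (v : Int),
    ts.reverse.foldl (fun vertex t => vertex * n + (PySem.Int.ofStr? t).getD 0) v
      = v * n ^ ts.length + pvHorner n ts := by
  induction ts with
  | nil => intro v; simp [pvHorner]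
  | cons t ts ih =>
      intro v
      simp only [List.reverse_cons, List.foldl_append, List.foldl_cons, List.foldl_nil]
      rw [ih]
      simp only [pvHorner, List.foldr_cons, List.length_cons, pow_succ]
      ring

theorem pvOuter {α β : Type} (g : α → β) (l : List α) : ∀ (acc : List β),
    l.foldl (fun acc s => acc ++ [g s]) acc = acc ++ l.map g := by
  induction l with
  | nil => intro acc; simp
  | cons x xs ih => intro acc; simp [ih]

-- ===== VERDICT (by name: the statement is the Claim_ definition above) =====
theorem convertClique_spec : Claim_equal_convertClique := by
  intro clique n _ _
  unfold Spec_convertClique convertClique convertClique_alt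
  rw [pvOuter, pvOuter]
  simp only [List.nil_append]
  apply List.map_congr_left
  intro s _
  rw [pvInnerB]
  have h := pvInnerA n ((PySem.Str.split? s ",").getD []) 0 0
  simp only [pow_zero, one_mul, zero_add, zero_mul] at h ⊢
  exact h
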